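-- pv_equiv track=rewrite | github.com/mckay22/VT-File-Scanner | src/main.py | check_exclude_file_ext_format
-- ===== SOURCE A (Python) =====
-- def check_exclude_file_ext_format(file_extensions: str) -> bool:
--     """checking if string matches valid extension format"""
--     list_of_file_ext = file_extensions.split(' ')
--     valid_extensions = 0
--     if len(file_extensions) == 0:
--         return True
--     for file_ext in list_of_file_ext:
--         if file_ext.startswith('.') and len(file_ext) > 1:
--             valid_extensions += 1
--     if len(list_of_file_ext) == valid_extensions:
--         return True
--     else:
--         return False
-- ===== SOURCE B (Python) =====
-- def check_exclude_file_ext_format(file_extensions: str) -> bool: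
--     """checking if string matches valid extension format"""
--     # single left-to-right scan: tokens are maximal runs between single spaces;
--     # each token must be '.' followed by at least one character
--     if len(file_extensions) == 0:
--         return True
--     state = 0  # 0 = at token start, 1 = just after the '.', 2 = inside a valid token
--     for c in file_extensions:
--         if state == 0:
--             if c != '.':
--                 return False
--             state = 1
--         elif state == 1:
--             if c == ' ':
--                 return False
--             state = 2
--         else:
--             if c == ' ':
--                 state = 0
--             else:
--                 state = 2
--     return state == 2
-- ===== Notes on version B (the rewrite author's own statement) =====
-- stated objective: alternative
-- what changed: Replaces split-on-space + counting valid tokens and comparing the count to the token count with a single character-level three-state scan that validates the format in one pass with early exit and no intermediate token list.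
import Mathlib
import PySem

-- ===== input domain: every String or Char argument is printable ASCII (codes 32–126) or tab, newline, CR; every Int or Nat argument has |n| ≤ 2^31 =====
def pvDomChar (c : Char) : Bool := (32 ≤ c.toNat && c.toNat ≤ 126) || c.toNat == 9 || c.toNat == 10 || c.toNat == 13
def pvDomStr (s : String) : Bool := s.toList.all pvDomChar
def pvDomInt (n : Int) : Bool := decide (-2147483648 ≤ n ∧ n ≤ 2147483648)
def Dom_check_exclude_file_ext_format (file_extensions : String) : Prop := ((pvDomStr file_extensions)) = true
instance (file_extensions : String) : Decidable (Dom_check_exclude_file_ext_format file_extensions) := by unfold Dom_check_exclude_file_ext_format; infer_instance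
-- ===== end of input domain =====

-- B replaces A's split-and-count pass with a single three-state character scan (alternative decomposition, same O(n) cost).

-- ===== PORT A =====
def check_exclude_file_ext_format (file_extensions : String) : Bool :=
  let cs := file_extensions.toList
  let list_of_file_ext := PySem.Chars.splitOn cs [' ']
  if cs.length == 0 then true
  else
    let valid_extensions : Int := list_of_file_ext.foldl
      (fun n file_ext =>
        if PySem.Chars.startswith file_ext ['.'] && decide (1 < PySem.Chars.len file_ext)
        then n + 1 else n) 0
    decide ((list_of_file_ext.length : Int) = valid_extensions)

-- ===== PORT B =====
def pvRunB : Nat → List Char → Bool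
  | st, [] => st == 2
  | 0, c :: cs => if c != '.' then false else pvRunB 1 cs
  | 1, c :: cs => if c == ' ' then false else pvRunB 2 cs
  | _, c :: cs => if c == ' ' then pvRunB 0 cs else pvRunB 2 cs

def check_exclude_file_ext_format_alt (file_extensions : String) : Bool :=
  if file_extensions.toList.length == 0 then true
  else pvRunB 0 file_extensions.toList

-- ===== PRECONDITION & SPEC =====
def Spec_check_exclude_file_ext_format (file_extensions : String) (out : Bool) : Prop := out = check_exclude_file_ext_format_alt file_extensions
instance (file_extensions : String) (out : Bool) : Decidable (Spec_check_exclude_file_ext_format file_extensions out) := by unfold Spec_check_exclude_file_ext_format; infer_instance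

-- ===== CLAIM (what is proved, stated in full; the proofs are below) =====
def Claim_equal_check_exclude_file_ext_format : Prop := ∀ (file_extensions : String), Dom_check_exclude_file_ext_format file_extensions → Spec_check_exclude_file_ext_format file_extensions (check_exclude_file_ext_format file_extensions)

-- ===== LEMMAS AND PROOFS =====

-- proof-side model of Python's  s.split(' ')  : first token and remaining tokens
def pvSplitSp : List Char → List Char × List (List Char)
  | [] => ([], [])
  | c :: cs =>
    if c = ' ' then ([], (pvSplitSp cs).1 :: (pvSplitSp cs).2)
    else (c :: (pvSplitSp cs).1, (pvSplitSp cs).2)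

-- a token is valid iff it is '.' followed by at least one character
def pvGood : List Char → Bool
  | '.' :: _ :: _ => true
  | _ => false

lemma pvGo_eq (fuel : Nat) (l cur : List Char) (acc : List (List Char))
    (h : l.length ≤ fuel) :
    PySem.Chars.splitOn.go [' '] fuel l cur acc
      = acc.reverse ++ (cur.reverse ++ (pvSplitSp l).1) :: (pvSplitSp l).2 := by
  induction fuel generalizing l cur acc with
  | zero =>
    interval_cases hl : l.length
    cases l with
    | nil => simp [PySem.Chars.splitOn.go, pvSplitSp]
    | cons c cs => simp at hl
  | succ fuel ih =>
    cases l with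
    | nil => simp [PySem.Chars.splitOn.go, pvSplitSp]
    | cons c cs =>
      by_cases hc : c = ' '
      · subst hc
        have hpre : [' '].isPrefixOf (' ' :: cs) = true := by
          simp [List.isPrefixOf]
        simp only [PySem.Chars.splitOn.go, hpre, if_pos]
        rw [show List.drop [' '].length (' ' :: cs) = cs by simp]
        rw [ih cs [] (cur.reverse :: acc) (by simpa using Nat.le_of_succ_le_succ (by simpa using h))]
        simp [pvSplitSp]
      · have hpre : [' '].isPrefixOf (c :: cs) = false := by
          simp [List.isPrefixOf]
          exact fun hcc => hc hcc.symm
        simp only [PySem.Chars.splitOn.go]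
        rw [if_neg (by simp [hpre])]
        rw [ih cs (c :: cur) acc (by simpa using Nat.le_of_succ_le_succ (by simpa using h))]
        simp [pvSplitSp, hc]

lemma pvSplitOn_eq (cs : List Char) :
    PySem.Chars.splitOn cs [' '] = (pvSplitSp cs).1 :: (pvSplitSp cs).2 := by
  unfold PySem.Chars.splitOn
  rw [pvGo_eq (cs.length + 1) cs [] [] (by omega)]
  simp

lemma pvRunB_spec (cs : List Char) :
    pvRunB 0 cs = (pvGood (pvSplitSp cs).1 && (pvSplitSp cs).2.all pvGood)
    ∧ pvRunB 1 cs = (decide ((pvSplitSp cs).1 ≠ []) && (pvSplitSp cs).2.all pvGood)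
    ∧ pvRunB 2 cs = (pvSplitSp cs).2.all pvGood := by
  induction cs with
  | nil => simp [pvRunB, pvSplitSp, pvGood]
  | cons c cs ih =>
    obtain ⟨ih0, ih1, ih2⟩ := ih
    by_cases hsp : c = ' '
    · subst hsp
      refine ⟨?_, ?_, ?_⟩ <;>
        simp [pvRunB, pvSplitSp, pvGood, ih0]
    · by_cases hdot : c = '.'
      · subst hdot
        refine ⟨?_, ?_, ?_⟩
        · rw [show pvRunB 0 ('.' :: cs) = pvRunB 1 cs by simp [pvRunB]]
          rw [ih1]
          cases h1 : (pvSplitSp cs).1 with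
          | nil => simp [pvSplitSp, h1, pvGood]
          | cons d ds => simp [pvSplitSp, h1, pvGood]
        · rw [show pvRunB 1 ('.' :: cs) = pvRunB 2 cs by simp [pvRunB]]
          rw [ih2]; simp [pvSplitSp, hsp]
        · rw [show pvRunB 2 ('.' :: cs) = pvRunB 2 cs by simp [pvRunB]]
          rw [ih2]; simp [pvSplitSp, hsp]
      · refine ⟨?_, ?_, ?_⟩
        · rw [show pvRunB 0 (c :: cs) = false by simp [pvRunB, hdot]]
          cases h1 : (pvSplitSp cs).1 with
          | nil => simp [pvSplitSp, hsp, hdot, h1, pvGood]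
          | cons d ds => simp [pvSplitSp, hsp, hdot, h1, pvGood]
        · rw [show pvRunB 1 (c :: cs) = pvRunB 2 cs by simp [pvRunB, hsp]]
          rw [ih2]; simp [pvSplitSp, hsp]
        · rw [show pvRunB 2 (c :: cs) = pvRunB 2 cs by simp [pvRunB, hsp]]
          rw [ih2]; simp [pvSplitSp, hsp]

lemma pvGood_eq (t : List Char) :
    (PySem.Chars.startswith t ['.'] && decide (1 < PySem.Chars.len t)) = pvGood t := by
  match t with
  | [] => simp [PySem.Chars.startswith, List.isPrefixOf, pvGood]
  | [c] =>
    simp [PySem.Chars.startswith, List.isPrefixOf, PySem.Chars.len, pvGood]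
  | c :: d :: ts =>
    by_cases hc : c = '.'
    · subst hc
      simp [PySem.Chars.startswith, List.isPrefixOf, PySem.Chars.len, pvGood]
    · simp [PySem.Chars.startswith, List.isPrefixOf, PySem.Chars.len, pvGood, hc]
      exact fun h => hc h.symm

lemma pvCount_all (l : List (List Char)) :
    (l.length == l.countP pvGood) = l.all pvGood := by
  rcases h : l.all pvGood with _ | _
  · obtain ⟨t, ht, hg⟩ := List.all_eq_false.mp h
    have hne : l.countP pvGood ≠ l.length := by
      intro he
      exact absurd (List.countP_eq_length.mp he t ht) (by simp [hg])
    have hle : l.countP pvGood ≤ l.length := List.countP_le_length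
    simp only [beq_eq_false_iff_ne]
    omega
  · simp only [List.all_eq_true] at h
    have : l.countP pvGood = l.length := List.countP_eq_length.mpr (fun a ha => h a ha)
    simp [this]

-- ===== VERDICT (by name: the statement is the Claim_ definition above) =====
theorem check_exclude_file_ext_format_spec : Claim_equal_check_exclude_file_ext_format := by
  intro s _
  unfold Spec_check_exclude_file_ext_format
  unfold check_exclude_file_ext_format check_exclude_file_ext_format_alt
  by_cases hz : s.toList.length = 0
  · simp [hz]
  · have hne : (s.toList.length == 0) = false := by rw [beq_eq_false_iff_ne]; exact hz
    simp only [hne, if_false, Bool.false_eq_true]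
    rw [PySem.List.foldl_count_if
      (fun file_ext => PySem.Chars.startswith file_ext ['.'] && decide (1 < PySem.Chars.len file_ext))
      (PySem.Chars.splitOn s.toList [' ']) 0]
    rw [List.countP_congr (fun t _ => by rw [pvGood_eq t])]
    rw [(pvRunB_spec s.toList).1]
    rw [show (0 : Int) + ((PySem.Chars.splitOn s.toList [' ']).countP pvGood : Int)
          = ((PySem.Chars.splitOn s.toList [' ']).countP pvGood : Int) by ring]
    rw [decide_eq_decide.mpr
      (Nat.cast_inj (R := Int)
        (m := (PySem.Chars.splitOn s.toList [' ']).length)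
        (n := (PySem.Chars.splitOn s.toList [' ']).countP pvGood))]
    rw [show (decide ((PySem.Chars.splitOn s.toList [' ']).length
            = (PySem.Chars.splitOn s.toList [' ']).countP pvGood))
        = ((PySem.Chars.splitOn s.toList [' ']).length
            == (PySem.Chars.splitOn s.toList [' ']).countP pvGood) by
      cases h : ((PySem.Chars.splitOn s.toList [' ']).length
          == (PySem.Chars.splitOn s.toList [' ']).countP pvGood) <;> simp_all]
    rw [pvCount_all, pvSplitOn_eq]
    simp
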